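-- pv_equiv track=rewrite | github.com/Agentic-Environmental-Engineering/GymVerse | gem/gem/envs/RLVE/warehouse_construction_env.py | _compute_user_cost
-- ===== SOURCE A (Python) =====
-- from typing import Any, Optional, SupportsFloat, Tuple, List
--
-- def _compute_user_cost(
--
--     indices: List[int],
--     N: int,
--     D: List[int],
--     P: List[int],
--     C: List[int],
-- ) -> Tuple[int, bool]:
--     """
--     Compute the total cost of the user's proposed set of warehouse indices.
--     Returns (cost, valid), where valid indicates feasibility.
--     """
--     # Check indices range
--     for idx in indices:
--         if idx < 0 or idx >= N:
--             return 0, False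
--
--     built = [False] * N
--     cost = 0
--     for idx in indices:
--         if not built[idx]:
--             built[idx] = True
--             cost += C[idx]
--
--     nearest_warehouse: Optional[int] = None
--     for i in range(N - 1, -1, -1):
--         if built[i]:
--             nearest_warehouse = i
--         if P[i] > 0:
--             if nearest_warehouse is None:
--                 # No downhill warehouse to receive products from i
--                 return 0, False
--             cost += P[i] * (D[nearest_warehouse] - D[i])
--
--     return cost, True
-- ===== SOURCE B (Python) =====
-- def _compute_user_cost(indices, N, D, P, C):
--     # segment decomposition over the sorted distinct built warehouses
--     if any(idx < 0 or idx >= N for idx in indices):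
--         return 0, False
--     W = sorted(set(indices))
--     cost = sum(C[j] for j in W)
--     last = W[-1] if W else -1
--     if any(P[i] > 0 for i in range(last + 1, N)):
--         return 0, False
--     prev = -1
--     for j in W:
--         for i in range(prev + 1, j + 1):
--             if P[i] > 0:
--                 cost += P[i] * (D[j] - D[i])
--         prev = j
--     return cost, True
-- ===== Notes on version B (the rewrite author's own statement) =====
-- stated objective: alternative
-- what changed: A marks warehouses in a boolean array and does a backward scan carrying a nearest-downstream-warehouse pointer with early-exit feasibility; B dedups via a set, sorts the distinct warehouse indices, detects infeasibility by checking only the tail positions beyond the last warehouse, and computes transport cost by iterating the sorted warehouses and summing over each warehouse's serving segment.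
-- outside the precondition, e.g. on _compute_user_cost([0], 2, [], [0, 1], [5, 5]): A returns (0, False), B returns (0, False); on _compute_user_cost([0], 2, [1, 2], [0, 0], [7]): A returns (7, True), B returns (7, True)
import Mathlib
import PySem

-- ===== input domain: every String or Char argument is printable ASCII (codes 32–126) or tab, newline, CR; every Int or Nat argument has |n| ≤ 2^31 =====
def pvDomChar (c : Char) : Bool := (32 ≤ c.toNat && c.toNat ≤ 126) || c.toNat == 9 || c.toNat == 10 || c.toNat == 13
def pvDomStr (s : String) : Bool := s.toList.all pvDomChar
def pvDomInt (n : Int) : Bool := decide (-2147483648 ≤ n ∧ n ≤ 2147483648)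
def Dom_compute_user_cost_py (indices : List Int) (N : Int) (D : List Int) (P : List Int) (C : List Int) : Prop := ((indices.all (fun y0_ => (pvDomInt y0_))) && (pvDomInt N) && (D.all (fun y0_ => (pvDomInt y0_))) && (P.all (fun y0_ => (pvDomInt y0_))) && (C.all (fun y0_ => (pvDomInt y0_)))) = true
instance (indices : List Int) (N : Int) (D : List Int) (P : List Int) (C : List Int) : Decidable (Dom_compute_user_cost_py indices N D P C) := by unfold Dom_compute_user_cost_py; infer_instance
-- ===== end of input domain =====

-- B replaces A's backward nearest-warehouse pointer scan by a sorted-distinct-warehouse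
-- segment decomposition (same cost, structurally different algorithm).


-- ===== PORT A =====
-- backward scan 'for i in range(N-1,-1,-1)': structural recursion, step i+1 processes index i
def pvA_loop3 (built : List Bool) (D : List Int) (P : List Int) : Nat → Option Int → Int → Int × Bool
  | 0, _, cost => (cost, true)
  | Nat.succ i, nw, cost =>
    let nw' := if PySem.List.pyGetD built (i : Int) false then some (i : Int) else nw
    if 0 < PySem.List.pyGetD P (i : Int) 0 then
      match nw' with
      | none => (0, false)
      | some j => pvA_loop3 built D P i nw'
          (cost + PySem.List.pyGetD P (i : Int) 0 * (PySem.List.pyGetD D j 0 - PySem.List.pyGetD D (i : Int) 0))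
    else pvA_loop3 built D P i nw' cost

def compute_user_cost_py (indices : List Int) (N : Int) (D : List Int) (P : List Int) (C : List Int) : Int × Bool :=
  if indices.any (fun idx => decide (idx < 0) || decide (N ≤ idx)) then (0, false)
  else
    let bc := indices.foldl
      (fun (s : List Bool × Int) idx =>
        if PySem.List.pyGetD s.1 idx false then s
        else (PySem.List.pySetD s.1 idx true, s.2 + PySem.List.pyGetD C idx 0))
      (List.replicate N.toNat false, 0)
    pvA_loop3 bc.1 D P N.toNat none bc.2

-- ===== PORT B =====
-- transport cost of the segment (prev, j] served by warehouse j
def pvB_inner (D : List Int) (P : List Int) (j : Int) (cost : Int) (prev : Int) : Int :=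
  (PySem.List.pyRange (prev + 1) (j + 1) 1).foldl
    (fun c i => if 0 < PySem.List.pyGetD P i 0
      then c + PySem.List.pyGetD P i 0 * (PySem.List.pyGetD D j 0 - PySem.List.pyGetD D i 0)
      else c) cost

def compute_user_cost_py_alt (indices : List Int) (N : Int) (D : List Int) (P : List Int) (C : List Int) : Int × Bool :=
  if indices.any (fun idx => decide (idx < 0) || decide (N ≤ idx)) then (0, false)
  else
    let W : List Int := PySem.List.sorted (PySem.Set.ofList indices) (fun x => x) false
    let cost0 : Int := (W.map (fun j => PySem.List.pyGetD C j 0)).sum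
    let last : Int := W.getLast?.getD (-1)
    if (PySem.List.pyRange (last + 1) N 1).any (fun i => decide (0 < PySem.List.pyGetD P i 0)) then (0, false)
    else
      let r := W.foldl (fun (s : Int × Int) j => (pvB_inner D P j s.1 s.2, j)) (cost0, -1)
      (r.1, true)

-- ===== PRECONDITION & SPEC =====
-- Pre_ excludes the inputs where A raises IndexError (D, P or C shorter than the positions
-- it indexes); for simplicity it requires len(D), len(P), len(C) ≥ N whenever no index is out
-- of range, which also excludes some short-array inputs on which A happens to return before
-- hitting the missing entry (B returns the same value there).
def Pre_compute_user_cost_py (indices : List Int) (N : Int) (D : List Int) (P : List Int) (C : List Int) : Prop :=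
  (∃ idx ∈ indices, idx < 0 ∨ N ≤ idx) ∨
    (N ≤ (D.length : Int) ∧ N ≤ (P.length : Int) ∧ N ≤ (C.length : Int))
instance (indices : List Int) (N : Int) (D : List Int) (P : List Int) (C : List Int) : Decidable (Pre_compute_user_cost_py indices N D P C) := by unfold Pre_compute_user_cost_py; infer_instance

def pvWitness_compute_user_cost_py : List Int × Int × List Int × List Int × List Int := ([0], 1, [2], [3], [4])

def Spec_compute_user_cost_py (indices : List Int) (N : Int) (D : List Int) (P : List Int) (C : List Int) (out : Int × Bool) : Prop := out = compute_user_cost_py_alt indices N D P C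
instance (indices : List Int) (N : Int) (D : List Int) (P : List Int) (C : List Int) (out : Int × Bool) : Decidable (Spec_compute_user_cost_py indices N D P C out) := by unfold Spec_compute_user_cost_py; infer_instance

-- ===== CLAIM (what is proved, stated in full; the proofs are below) =====
def Claim_equal_compute_user_cost_py : Prop := ∀ (indices : List Int) (N : Int) (D : List Int) (P : List Int) (C : List Int), Dom_compute_user_cost_py indices N D P C → Pre_compute_user_cost_py indices N D P C → Spec_compute_user_cost_py indices N D P C (compute_user_cost_py indices N D P C)

-- ===== LEMMAS AND PROOFS =====

-- 'nearest warehouse at or above k, below i': the least element of S in [k, i)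
def pvNear (S : List Int) (k i : Int) : Option Int :=
  (PySem.List.pyRange k i 1).find? (fun j => decide (j ∈ S))

-- whether A's backward scan over positions [0, i) (entered with pointer nw) reports infeasibility
def pvBad (S P : List Int) (i : Int) (nw : Option Int) : Bool :=
  (PySem.List.pyRange 0 i 1).any
    (fun k => decide (0 < PySem.List.pyGetD P k 0) && (pvNear S k i).isNone && nw.isNone)

-- total transport cost of positions [0, i), nearest warehouse defaulting to dflt
def pvCost (S D P : List Int) (i : Int) (dflt : Int) : Int :=
  ((PySem.List.pyRange 0 i 1).map
    (fun k => if 0 < PySem.List.pyGetD P k 0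
      then PySem.List.pyGetD P k 0 * (PySem.List.pyGetD D ((pvNear S k i).getD dflt) 0 - PySem.List.pyGetD D k 0)
      else 0)).sum


-- foldl of a guarded accumulator is the initial value plus a guarded sum
theorem pv_foldl_guard_add (p : Int → Prop) [DecidablePred p] (f : Int → Int) :
    ∀ (l : List Int) (c : Int),
      l.foldl (fun c i => if p i then c + f i else c) c
        = c + (l.map (fun i => if p i then f i else 0)).sum := by
  intro l
  induction l with
  | nil => intro c; simp
  | cons a l ih =>
    intro c
    simp only [List.foldl_cons, List.map_cons, List.sum_cons]
    by_cases h : p a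
    · rw [if_pos h, if_pos h, ih]; ring
    · rw [if_neg h, if_neg h, ih]; ring


-- Set.add-folding keeps the accumulator as a prefix
theorem pv_prefix (l : List Int) : ∀ (s : List Int), s <+: List.foldl PySem.Set.add s l := by
  induction l with
  | nil => intro s; simp
  | cons a l ih =>
    intro s
    refine List.IsPrefix.trans ?_ (ih (PySem.Set.add s a))
    simp only [PySem.Set.add, PySem.Set.contains]
    split
    · exact List.prefix_refl s
    · exact ⟨[a], rfl⟩

-- invariant of A's dedup/construction-cost fold
theorem pv_fold2 (C : List Int) (n : Nat) :
    ∀ (l : List Int) (b : List Bool) (s : List Int) (c : Int),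
      b.length = n →
      (∀ k : Int, 0 ≤ k → k < (n : Int) → PySem.List.pyGetD b k false = decide (k ∈ s)) →
      (∀ a ∈ l, 0 ≤ a ∧ a < (n : Int)) →
      ((l.foldl
          (fun (sc : List Bool × Int) idx =>
            if PySem.List.pyGetD sc.1 idx false then sc
            else (PySem.List.pySetD sc.1 idx true, sc.2 + PySem.List.pyGetD C idx 0))
          (b, c)).1.length = n
        ∧ (∀ k : Int, 0 ≤ k → k < (n : Int) →
            PySem.List.pyGetD (l.foldl
              (fun (sc : List Bool × Int) idx =>
                if PySem.List.pyGetD sc.1 idx false then sc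
                else (PySem.List.pySetD sc.1 idx true, sc.2 + PySem.List.pyGetD C idx 0))
              (b, c)).1 k false = decide (k ∈ List.foldl PySem.Set.add s l))
        ∧ (l.foldl
            (fun (sc : List Bool × Int) idx =>
              if PySem.List.pyGetD sc.1 idx false then sc
              else (PySem.List.pySetD sc.1 idx true, sc.2 + PySem.List.pyGetD C idx 0))
            (b, c)).2
            = c + (((List.foldl PySem.Set.add s l).drop s.length).map
                (fun j => PySem.List.pyGetD C j 0)).sum) := by
  intro l
  induction l with
  | nil => intro b s c hlen hmem _; exact ⟨by simpa using hlen, by simpa using hmem, by simp⟩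
  | cons a l ih =>
    intro b s c hlen hmem hval
    rcases hval a List.mem_cons_self with ⟨ha0, han⟩
    have hna : a = ((a.toNat : Nat) : Int) := (Int.toNat_of_nonneg ha0).symm
    have hlt : a.toNat < n := by omega
    have hba : PySem.List.pyGetD b a false = decide (a ∈ s) := hmem a ha0 han
    simp only [List.foldl_cons]
    by_cases has : a ∈ s
    · rw [hba]
      simp only [has, decide_true, if_true]
      have hadd : PySem.Set.add s a = s := by
        simp [PySem.Set.add, PySem.Set.contains, has]
      have := ih b s c hlen hmem (fun x hx => hval x (List.mem_cons_of_mem _ hx))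
      simpa [hadd] using this
    · rw [hba]
      simp only [has, decide_false, Bool.false_eq_true, if_false]
      have hadd : PySem.Set.add s a = s ++ [a] := by
        simp [PySem.Set.add, PySem.Set.contains, has]
      have hlen' : (PySem.List.pySetD b a true).length = n := by
        simp [PySem.List.length_pySetD, hlen]
      have hmem' : ∀ k : Int, 0 ≤ k → k < (n : Int) →
          PySem.List.pyGetD (PySem.List.pySetD b a true) k false = decide (k ∈ s ++ [a]) := by
        intro k hk0 hkn
        have hkk : k = ((k.toNat : Nat) : Int) := (Int.toNat_of_nonneg hk0).symm
        rw [hna, hkk, PySem.List.pyGetD_pySetD_natCast b a.toNat k.toNat true false (by omega)]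
        by_cases hk : k.toNat = a.toNat
        · rw [if_pos hk]
          have hka : k = a := by omega
          simp [hka]
        · have hne : k ≠ a := by omega
          rw [if_neg hk, ← hkk, hmem k hk0 hkn]
          simp
          intro h
          exact absurd (show k = a by omega) hne
      have hrec := ih (PySem.List.pySetD b a true) (s ++ [a])
        (c + PySem.List.pyGetD C a 0) hlen' hmem'
        (fun x hx => hval x (List.mem_cons_of_mem _ hx))
      simp only [hadd]
      refine ⟨hrec.1, hrec.2.1, ?_⟩
      rw [hrec.2.2]
      rcases pv_prefix l (s ++ [a]) with ⟨t, hteq⟩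
      rw [← hteq]
      rw [List.append_assoc]
      rw [List.drop_left, List.singleton_append]
      have h2 : ((s ++ [a]) ++ t).drop (s ++ [a]).length = t := List.drop_left
      rw [List.append_assoc, List.singleton_append] at h2
      rw [h2]
      simp only [List.map_cons, List.sum_cons]
      ring

-- splitting the nearest-warehouse search at the top position
theorem pv_near_succ (S : List Int) (k i : Int) (h : k ≤ i) :
    pvNear S k (i + 1) = (pvNear S k i).or (if (i : Int) ∈ S then some i else none) := by
  unfold pvNear
  rw [PySem.List.pyRange_one_succ_right h, List.find?_append]
  cases hfi : (PySem.List.pyRange k i 1).find? (fun j => decide (j ∈ S)) with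
  | some m => simp
  | none =>
    simp only [Option.none_or]
    by_cases hiS : (i : Int) ∈ S <;> simp [List.find?, hiS]

-- characterisation of A's backward scan
theorem pv_loop3_char (S D P : List Int) (built : List Bool) (n : Nat)
    (hmem : ∀ k : Int, 0 ≤ k → k < (n : Int) → PySem.List.pyGetD built k false = decide (k ∈ S)) :
    ∀ (i : Nat), i ≤ n → ∀ (nw : Option Int) (cost : Int),
      pvA_loop3 built D P i nw cost =
        if pvBad S P i nw then (0, false)
        else (cost + pvCost S D P i (nw.getD 0), true) := by
  intro i
  induction i with
  | zero =>
    intro _ nw cost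
    simp [pvA_loop3, pvBad, pvCost, PySem.List.pyRange_one_eq_nil (le_refl (0 : Int))]
  | succ i ih =>
    intro hin nw cost
    have hii : i ≤ n := by omega
    have hI0 : (0 : Int) ≤ (i : Int) := by positivity
    have hin' : (i : Int) < (n : Int) := by exact_mod_cast hin
    have bi : PySem.List.pyGetD built (i : Int) false = decide ((i : Int) ∈ S) :=
      hmem (i : Int) hI0 hin'
    have hc : ((i + 1 : Nat) : Int) = (i : Int) + 1 := by push_cast; ring
    have hrange : PySem.List.pyRange 0 ((i : Int) + 1) 1
        = PySem.List.pyRange 0 (i : Int) 1 ++ [(i : Int)] :=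
      PySem.List.pyRange_one_succ_right hI0
    have hnearI : pvNear S (i : Int) ((i : Int) + 1)
        = (if (i : Int) ∈ S then some (i : Int) else none) := by
      unfold pvNear
      rw [PySem.List.pyRange_one_singleton]
      by_cases hiS : (i : Int) ∈ S <;> simp [List.find?, hiS]
    -- the updated pointer, written once
    have hBAD : pvBad S P ((i : Int) + 1) nw
        = ((decide (0 < PySem.List.pyGetD P (i : Int) 0)
              && ((if (i : Int) ∈ S then some (i : Int) else none).or nw).isNone)
            || pvBad S P (i : Int) ((if (i : Int) ∈ S then some (i : Int) else none).or nw)) := by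
      unfold pvBad
      rw [hrange, List.any_append]
      have h1 : (PySem.List.pyRange 0 (i : Int) 1).any
            (fun k => decide (0 < PySem.List.pyGetD P k 0)
              && (pvNear S k ((i : Int) + 1)).isNone && nw.isNone)
          = (PySem.List.pyRange 0 (i : Int) 1).any
            (fun k => decide (0 < PySem.List.pyGetD P k 0)
              && (pvNear S k (i : Int)).isNone
              && ((if (i : Int) ∈ S then some (i : Int) else none).or nw).isNone) := by
        refine PySem.List.any_congr_mem ?_
        intro k hk
        have hk' := (PySem.List.mem_pyRange_one).1 hk
        rw [pv_near_succ S k (i : Int) (by omega)]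
        cases hnk : pvNear S k (i : Int) with
        | some m => simp
        | none =>
          by_cases hiS : (i : Int) ∈ S <;> simp [hiS]
      rw [h1]
      have h2 : [(i : Int)].any
            (fun k => decide (0 < PySem.List.pyGetD P k 0)
              && (pvNear S k ((i : Int) + 1)).isNone && nw.isNone)
          = (decide (0 < PySem.List.pyGetD P (i : Int) 0)
              && ((if (i : Int) ∈ S then some (i : Int) else none).or nw).isNone) := by
        simp only [List.any_cons, List.any_nil, Bool.or_false]
        rw [hnearI]
        by_cases hiS : (i : Int) ∈ S <;> simp [hiS]
      rw [h2, Bool.or_comm]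
    have hCOST : pvCost S D P ((i : Int) + 1) (nw.getD 0)
        = pvCost S D P (i : Int)
            (((if (i : Int) ∈ S then some (i : Int) else none).or nw).getD 0)
          + (if 0 < PySem.List.pyGetD P (i : Int) 0
              then PySem.List.pyGetD P (i : Int) 0 *
                (PySem.List.pyGetD D
                  (((if (i : Int) ∈ S then some (i : Int) else none).or nw).getD 0) 0
                  - PySem.List.pyGetD D (i : Int) 0)
              else 0) := by
      unfold pvCost
      rw [hrange, List.map_append, List.sum_append]
      congr 1
      · refine congrArg List.sum (List.map_congr_left ?_)
        intro k hk
        have hk' := (PySem.List.mem_pyRange_one).1 hk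
        rw [pv_near_succ S k (i : Int) (by omega)]
        cases hnk : pvNear S k (i : Int) with
        | some m => simp
        | none =>
          by_cases hiS : (i : Int) ∈ S <;> cases nw <;> simp [hiS]
      · rw [List.map_singleton, List.sum_singleton, hnearI]
        by_cases hiS : (i : Int) ∈ S <;> cases nw <;> simp [hiS]
    rw [hc]
    simp only [pvA_loop3, bi]
    by_cases hP : 0 < PySem.List.pyGetD P (i : Int) 0
    · by_cases hiS : (i : Int) ∈ S
      · have hor : (if (i : Int) ∈ S then some (i : Int) else none).or nw = some (i : Int) := by
          simp [hiS]
        simp only [decide_eq_true hiS, if_true, if_pos hP]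
        show pvA_loop3 built D P i (some (i : Int))
            (cost + PySem.List.pyGetD P (i : Int) 0 *
              (PySem.List.pyGetD D (i : Int) 0 - PySem.List.pyGetD D (i : Int) 0)) = _
        rw [ih hii (some (i : Int)) _, hBAD, hCOST, hor]
        simp only [Option.isNone_some, Bool.and_false, Bool.false_or, Option.getD_some,
          if_pos hP]
        cases hcond : pvBad S P (i : Int) (some (i : Int)) with
        | true => rw [if_pos rfl, if_pos rfl]
        | false =>
          rw [if_neg (by simp), if_neg (by simp)]
          simp only [Prod.mk.injEq]
          exact ⟨by ring, by trivial⟩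
      · have hor : (if (i : Int) ∈ S then some (i : Int) else none).or nw = nw := by
          simp [hiS]
        simp only [decide_eq_false hiS, Bool.false_eq_true, if_false, if_pos hP]
        cases nw with
        | none =>
          rw [hBAD, hor]
          simp only [Option.isNone_none, Bool.and_true, decide_eq_true hP, Bool.true_or]
          simp
        | some j =>
          show pvA_loop3 built D P i (some j)
              (cost + PySem.List.pyGetD P (i : Int) 0 *
                (PySem.List.pyGetD D j 0 - PySem.List.pyGetD D (i : Int) 0)) = _
          rw [ih hii (some j) _, hBAD, hCOST, hor]
          simp only [Option.isNone_some, Bool.and_false, Bool.false_or, Option.getD_some,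
            if_pos hP]
          cases hcond : pvBad S P (i : Int) (some j) with
          | true => rw [if_pos rfl, if_pos rfl]
          | false =>
            rw [if_neg (by simp), if_neg (by simp)]
            simp only [Prod.mk.injEq]
            exact ⟨by ring, by trivial⟩
    · rw [if_neg hP]
      by_cases hiS : (i : Int) ∈ S
      · have hor : (if (i : Int) ∈ S then some (i : Int) else none).or nw = some (i : Int) := by
          simp [hiS]
        simp only [decide_eq_true hiS, if_true]
        rw [ih hii (some (i : Int)) _, hBAD, hCOST, hor]
        simp only [Option.isNone_some, Bool.and_false, Bool.false_or, Option.getD_some,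
          if_neg hP, add_zero]
      · have hor : (if (i : Int) ∈ S then some (i : Int) else none).or nw = nw := by
          simp [hiS]
        simp only [decide_eq_false hiS, Bool.false_eq_true, if_false]
        rw [ih hii nw _, hBAD, hCOST, hor]
        simp only [if_neg hP, add_zero]
        cases hcond : pvBad S P (i : Int) nw with
        | true =>
          rw [if_pos rfl]
          have : (decide (0 < PySem.List.pyGetD P (i : Int) 0) && nw.isNone || true) = true := by
            simp
          rw [if_pos this]
        | false =>
          simp only [decide_eq_false hP, Bool.false_and, Bool.false_or]

-- on a strictly increasing list, find? returns the least satisfying element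
theorem pv_find_sorted_min (p : Int → Bool) :
    ∀ (l : List Int), l.Pairwise (· < ·) → ∀ m, l.find? p = some m →
      p m = true ∧ m ∈ l ∧ ∀ x ∈ l, p x = true → m ≤ x := by
  intro l
  induction l with
  | nil => intro _ m h; simp at h
  | cons a l ih =>
    intro hp m h
    rw [List.find?_cons] at h
    rcases List.pairwise_cons.1 hp with ⟨ha, hp'⟩
    split at h
    · rename_i hpa
      cases h
      exact ⟨hpa, List.mem_cons_self, by
        intro x hx _
        rcases List.mem_cons.1 hx with rfl | hx'
        · exact le_refl _
        · exact le_of_lt (ha x hx')⟩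
    · rename_i hpa
      rcases ih hp' m h with ⟨h1, h2, h3⟩
      refine ⟨h1, List.mem_cons_of_mem _ h2, ?_⟩
      intro x hx hpx
      rcases List.mem_cons.1 hx with rfl | hx'
      · exact absurd hpx (by simpa using hpa)
      · exact h3 x hx' hpx

-- pvNear over [k, N) equals the first element ≥ k of the sorted warehouse list
theorem pv_near_eq_findW (S W : List Int) (N : Int)
    (hsub : ∀ a ∈ S, 0 ≤ a ∧ a < N) (hperm : W.Perm S) (hsort : W.Pairwise (· < ·))
    (k : Int) :
    pvNear S k N = W.find? (fun j => decide (k ≤ j)) := by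
  have hmemW : ∀ x : Int, x ∈ W ↔ x ∈ S := fun x => hperm.mem_iff
  have hpr : (PySem.List.pyRange k N 1).Pairwise (· < ·) := PySem.List.pairwise_lt_pyRange_one k N
  cases hL : pvNear S k N with
  | none =>
    cases hR : W.find? (fun j => decide (k ≤ j)) with
    | none => rfl
    | some m =>
      exfalso
      have hm : m ∈ W := List.mem_of_find?_eq_some hR
      have hkm : k ≤ m := by simpa using List.find?_some hR
      have hmS : m ∈ S := (hmemW m).1 hm
      have hmr : m ∈ PySem.List.pyRange k N 1 :=
        (PySem.List.mem_pyRange_one).2 ⟨hkm, (hsub m hmS).2⟩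
      have := List.find?_eq_none.1 hL m hmr
      simp [hmS] at this
  | some m =>
    have hm1 := pv_find_sorted_min _ _ hpr m hL
    have hmS : m ∈ S := by simpa using hm1.1
    have hmr := (PySem.List.mem_pyRange_one).1 hm1.2.1
    cases hR : W.find? (fun j => decide (k ≤ j)) with
    | none =>
      exfalso
      have := List.find?_eq_none.1 hR m ((hmemW m).2 hmS)
      simp [hmr.1] at this
    | some m' =>
      have hm'1 := pv_find_sorted_min _ _ hsort m' hR
      have hkm' : k ≤ m' := by simpa using hm'1.1
      have hm'S : m' ∈ S := (hmemW m').1 hm'1.2.1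
      have h1 : m ≤ m' := hm1.2.2 m'
        ((PySem.List.mem_pyRange_one).2 ⟨hkm', (hsub m' hm'S).2⟩) (by simp [hm'S])
      have h2 : m' ≤ m := hm'1.2.2 m ((hmemW m).2 hmS) (by simp [hmr.1])
      have : m = m' := le_antisymm h1 h2
      simp [this]

-- every element of a strictly increasing list is at most its last element
theorem pv_last_max (d : Int) : ∀ (W : List Int), W.Pairwise (· < ·) →
    ∀ x ∈ W, x ≤ W.getLast?.getD d := by
  intro W
  induction W with
  | nil => intro _ x hx; simp at hx
  | cons a l ih =>
    intro hp x hx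
    rcases List.pairwise_cons.1 hp with ⟨ha, hp'⟩
    cases l with
    | nil => simp at hx; simp [hx]
    | cons b t =>
      rw [List.getLast?_cons_cons]
      rcases List.mem_cons.1 hx with rfl | hx'
      · exact le_of_lt (lt_of_lt_of_le (ha b List.mem_cons_self)
          (ih hp' b List.mem_cons_self))
      · exact ih hp' x hx'

-- segment decomposition of B's warehouse fold
theorem pv_seg (D P : List Int) :
    ∀ (Wl : List Int) (prev cost : Int), Wl.Pairwise (· < ·) → (∀ j ∈ Wl, prev < j) →
      (Wl.foldl (fun (s : Int × Int) j => (pvB_inner D P j s.1 s.2, j)) (cost, prev)).1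
        = cost + ((PySem.List.pyRange (prev + 1) (Wl.getLast?.getD prev + 1) 1).map
            (fun k => if 0 < PySem.List.pyGetD P k 0
              then PySem.List.pyGetD P k 0 *
                (PySem.List.pyGetD D ((Wl.find? (fun j => decide (k ≤ j))).getD 0) 0
                  - PySem.List.pyGetD D k 0)
              else 0)).sum := by
  intro Wl
  induction Wl with
  | nil =>
    intro prev cost _ _
    simp [PySem.List.pyRange_one_eq_nil (le_refl (prev + 1))]
  | cons j rest ih =>
    intro prev cost hp hgt
    rcases List.pairwise_cons.1 hp with ⟨hj, hp'⟩
    have hpj : prev < j := hgt j List.mem_cons_self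
    have hL : (j :: rest).getLast?.getD prev = rest.getLast?.getD j := by
      cases rest with
      | nil => simp
      | cons b t =>
        rw [List.getLast?_cons_cons]
        cases hgl : (b :: t).getLast? with
        | none => simp at hgl
        | some x => simp
    have hjL : j ≤ rest.getLast?.getD j := by
      cases rest with
      | nil => simp
      | cons b t =>
        exact le_of_lt (lt_of_lt_of_le (hj b List.mem_cons_self)
          (pv_last_max j (b :: t) hp' b List.mem_cons_self))
    simp only [List.foldl_cons, hL]
    rw [ih j (pvB_inner D P j cost prev) hp' (fun x hx => hj x hx)]
    unfold pvB_inner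
    rw [pv_foldl_guard_add]
    rw [PySem.List.pyRange_one_append (prev + 1) (j + 1) (rest.getLast?.getD j + 1)
      (by omega) (by omega)]
    rw [List.map_append, List.sum_append]
    have e1 : ∀ k ∈ PySem.List.pyRange (prev + 1) (j + 1) 1,
        (if 0 < PySem.List.pyGetD P k 0
          then PySem.List.pyGetD P k 0 *
            (PySem.List.pyGetD D (((j :: rest).find? (fun x => decide (k ≤ x))).getD 0) 0
              - PySem.List.pyGetD D k 0)
          else 0)
        = (if 0 < PySem.List.pyGetD P k 0
          then PySem.List.pyGetD P k 0 *
            (PySem.List.pyGetD D j 0 - PySem.List.pyGetD D k 0)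
          else 0) := by
      intro k hk
      have hk' := (PySem.List.mem_pyRange_one).1 hk
      have hkj : k ≤ j := by omega
      have hfind : List.find? (fun x => decide (k ≤ x)) (j :: rest) = some j := by
        simp [hkj]
      rw [hfind]
      simp
    have e2 : ∀ k ∈ PySem.List.pyRange (j + 1) (rest.getLast?.getD j + 1) 1,
        (if 0 < PySem.List.pyGetD P k 0
          then PySem.List.pyGetD P k 0 *
            (PySem.List.pyGetD D (((j :: rest).find? (fun x => decide (k ≤ x))).getD 0) 0
              - PySem.List.pyGetD D k 0)
          else 0)
        = (if 0 < PySem.List.pyGetD P k 0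
          then PySem.List.pyGetD P k 0 *
            (PySem.List.pyGetD D ((rest.find? (fun x => decide (k ≤ x))).getD 0) 0
              - PySem.List.pyGetD D k 0)
          else 0) := by
      intro k hk
      have hk' := (PySem.List.mem_pyRange_one).1 hk
      have hkj : ¬ k ≤ j := by omega
      have hfind : List.find? (fun x => decide (k ≤ x)) (j :: rest)
          = List.find? (fun x => decide (k ≤ x)) rest := by
        simp [hkj]
      rw [hfind]
    rw [List.map_congr_left e1, List.map_congr_left e2]
    ring

-- ===== VERDICT (by name: the statement is the Claim_ definition above) =====
theorem compute_user_cost_py_spec : Claim_equal_compute_user_cost_py := by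
  intro indices N D P C _ hPre
  unfold Spec_compute_user_cost_py
  by_cases hbad : indices.any (fun idx => decide (idx < 0) || decide (N ≤ idx)) = true
  · simp only [compute_user_cost_py, compute_user_cost_py_alt, if_pos hbad]
  · have hval : ∀ a ∈ indices, 0 ≤ a ∧ a < N := by simpa using hbad
    have hlen : N ≤ (D.length : Int) ∧ N ≤ (P.length : Int) ∧ N ≤ (C.length : Int) := by
      rcases hPre with ⟨x, hx, hlt⟩ | h
      · rcases hval x hx with ⟨h1, h2⟩; omega
      · exact h
    by_cases hN : 0 ≤ N
    case neg =>
      have hind : indices = [] := by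
        cases hi : indices with
        | nil => rfl
        | cons a l => rcases hval a (by rw [hi]; exact List.mem_cons_self) with ⟨h1, h2⟩; omega
      subst hind
      have hN0 : N.toNat = 0 := by omega
      simp [compute_user_cost_py, compute_user_cost_py_alt, hN0, pvA_loop3,
        show PySem.List.sorted ([] : List Int) (fun x : Int => x) false = [] from rfl]
      intro x _ h2
      exact absurd h2 (by omega)
    case pos =>
    have hNn : ((N.toNat : Nat) : Int) = N := by omega
    -- the distinct built warehouses, in first-occurrence order
    set S : List Int := PySem.Set.ofList indices with hS
    have hSmem : ∀ x : Int, x ∈ S ↔ x ∈ indices := fun x => by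
      rw [hS]; exact PySem.Set.mem_ofList indices x
    have hSval : ∀ a ∈ S, 0 ≤ a ∧ a < N := fun a ha => hval a ((hSmem a).1 ha)
    -- A's dedup fold
    have hfold := pv_fold2 C N.toNat indices (List.replicate N.toNat false) [] 0
      (by simp)
      (by
        intro k hk0 hkn
        rw [PySem.List.pyGetD_eq_getElem _ _ hk0 (by simpa using hkn)]
        simp)
      (by intro a ha; rcases hval a ha with ⟨h1, h2⟩; omega)
    have hSfold : List.foldl PySem.Set.add [] indices = S := by
      rw [hS, PySem.Set.ofList_eq_foldl]
    rw [hSfold] at hfold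
    obtain ⟨hblen, hbmem, hbcost⟩ := hfold
    simp only [List.length_nil, List.drop_zero, zero_add] at hbcost
    -- B's sorted warehouse list
    set W : List Int := PySem.List.sorted S (fun x => x) false with hW
    have hWperm : W.Perm S := PySem.List.sorted_perm S (fun x => x) false
    have hWsort : W.Pairwise (· < ·) := by
      rw [hW, hS]; exact PySem.List.sorted_ofList_pairwise_lt indices
    have hnearW : ∀ k : Int, pvNear S k N = W.find? (fun j => decide (k ≤ j)) :=
      pv_near_eq_findW S W N hSval hWperm hWsort
    set last : Int := W.getLast?.getD (-1) with hlast
    have hlastW : W ≠ [] → last ∈ W := by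
      intro h
      rw [hlast, List.getLast?_eq_some_getLast h]
      simp [List.getLast_mem]
    have hlastlt : last < N := by
      cases hWe : W with
      | nil => rw [hlast, hWe]; simpa using by omega
      | cons a l =>
        exact (hSval last (hWperm.mem_iff.1 (hlastW (by rw [hWe]; simp)))).2
    have hlastge : -1 ≤ last := by
      cases hWe : W with
      | nil => rw [hlast, hWe]; simp
      | cons a l =>
        have := (hSval last (hWperm.mem_iff.1 (hlastW (by rw [hWe]; simp)))).1
        omega
    have hnone_iff : ∀ k : Int, 0 ≤ k → ((pvNear S k N).isNone = true ↔ last < k) := by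
      intro k hk0
      rw [hnearW k, Option.isNone_iff_eq_none]
      constructor
      · intro h
        cases hWe : W with
        | nil => rw [hlast, hWe]; simp; omega
        | cons a l =>
          have hl := List.find?_eq_none.1 h last (hlastW (by rw [hWe]; simp))
          simpa using hl
      · intro h
        refine List.find?_eq_none.2 ?_
        intro j hj
        have := pv_last_max (-1) W hWsort j hj
        simp only [decide_eq_true_eq]
        omega
    -- feasibility checks agree
    have hfeas : (PySem.List.pyRange (last + 1) N 1).any
          (fun i => decide (0 < PySem.List.pyGetD P i 0)) = pvBad S P N none := by
      unfold pvBad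
      rw [PySem.List.pyRange_one_append 0 (last + 1) N (by omega) (by omega),
        List.any_append]
      have h1 : (PySem.List.pyRange 0 (last + 1) 1).any
          (fun k => decide (0 < PySem.List.pyGetD P k 0)
            && (pvNear S k N).isNone && (none : Option Int).isNone) = false := by
        refine List.any_eq_false.2 ?_
        intro k hk
        have hk' := (PySem.List.mem_pyRange_one).1 hk
        have : (pvNear S k N).isNone = false := by
          cases hmm : (pvNear S k N).isNone with
          | false => rfl
          | true => exact absurd ((hnone_iff k (by omega)).1 hmm) (by omega)
        simp [this]
      have h2 : (PySem.List.pyRange (last + 1) N 1).any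
          (fun k => decide (0 < PySem.List.pyGetD P k 0)
            && (pvNear S k N).isNone && (none : Option Int).isNone)
          = (PySem.List.pyRange (last + 1) N 1).any
            (fun i => decide (0 < PySem.List.pyGetD P i 0)) := by
        refine PySem.List.any_congr_mem ?_
        intro k hk
        have hk' := (PySem.List.mem_pyRange_one).1 hk
        have : (pvNear S k N).isNone = true := (hnone_iff k (by omega)).2 (by omega)
        simp [this]
      rw [h1, h2, Bool.false_or]
    -- rewrite both programs
    simp only [compute_user_cost_py, compute_user_cost_py_alt, if_neg hbad]
    rw [pv_loop3_char S D P _ N.toNat hbmem N.toNat le_rfl none _]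
    rw [hNn, hbcost]
    simp only [Option.getD_none]
    rw [← hS, ← hW, ← hlast, hfeas]
    cases hfb : pvBad S P N none with
    | true => simp
    | false =>
      simp only [Bool.false_eq_true, if_false]
      have hseg := pv_seg D P W (-1) ((W.map (fun j => PySem.List.pyGetD C j 0)).sum)
        hWsort (by intro j hj; exact (hSval j (hWperm.mem_iff.1 hj)).1.trans_lt' (by omega))
      rw [hseg]
      simp only [Prod.mk.injEq]
      refine ⟨?_, by trivial⟩
      -- construction costs agree (sum over a permutation)
      have hcc : ((W.map (fun j => PySem.List.pyGetD C j 0)).sum : Int)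
          = ((S.map (fun j => PySem.List.pyGetD C j 0)).sum : Int) :=
        (hWperm.map _).sum_eq
      -- transport costs agree
      have htc : pvCost S D P N 0
          = ((PySem.List.pyRange (-1 + 1) (W.getLast?.getD (-1) + 1) 1).map
              (fun k => if 0 < PySem.List.pyGetD P k 0
                then PySem.List.pyGetD P k 0 *
                  (PySem.List.pyGetD D ((W.find? (fun j => decide (k ≤ j))).getD 0) 0
                    - PySem.List.pyGetD D k 0)
                else 0)).sum := by
        unfold pvCost
        rw [PySem.List.pyRange_one_append 0 (last + 1) N (by omega) (by omega),
          List.map_append, List.sum_append]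
        have hz : ((PySem.List.pyRange (last + 1) N 1).map
            (fun k => if 0 < PySem.List.pyGetD P k 0
              then PySem.List.pyGetD P k 0 *
                (PySem.List.pyGetD D ((pvNear S k N).getD 0) 0 - PySem.List.pyGetD D k 0)
              else 0)).sum = 0 := by
          have : ∀ k ∈ PySem.List.pyRange (last + 1) N 1,
              (if 0 < PySem.List.pyGetD P k 0
                then PySem.List.pyGetD P k 0 *
                  (PySem.List.pyGetD D ((pvNear S k N).getD 0) 0 - PySem.List.pyGetD D k 0)
                else 0) = 0 := by
            intro k hk
            have hp : ¬ 0 < PySem.List.pyGetD P k 0 := by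
              have h2 := List.any_eq_false.1 (by rw [hfeas]; exact hfb) k hk
              simpa using h2
            rw [if_neg hp]
          rw [List.map_congr_left this]
          simp
        rw [hz, add_zero]
        have he : ∀ k ∈ PySem.List.pyRange 0 (last + 1) 1,
            (if 0 < PySem.List.pyGetD P k 0
              then PySem.List.pyGetD P k 0 *
                (PySem.List.pyGetD D ((pvNear S k N).getD 0) 0 - PySem.List.pyGetD D k 0)
              else 0)
            = (if 0 < PySem.List.pyGetD P k 0
              then PySem.List.pyGetD P k 0 *
                (PySem.List.pyGetD D ((W.find? (fun j => decide (k ≤ j))).getD 0) 0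
                  - PySem.List.pyGetD D k 0)
              else 0) := by
          intro k hk
          rw [hnearW k]
        rw [List.map_congr_left he]
        norm_num [← hlast]
      rw [hcc, htc]
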